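-- pv_equiv track=rewrite | github.com/MarijnSt/soccermatics-project-1 | src/player_info.py | get_position_label
-- ===== SOURCE A (Python) =====
-- def get_position_label(positions):
--     """
--     Get the position label for a player based on the positions they played in a game.
--
--     Parameters
--     ----------
--     positions: dict
--         A dictionary with the positions and the count of how many events the player has in certain positions.
--
--     Returns
--     -------
--     str
--         The position label for the player.
--     """
--     keeper_ids = {1}
--     defender_ids = {2, 3, 4, 5, 6, 7, 8}
--     midfielder_ids = {9, 10, 11, 12, 13, 14, 15, 16}
--     forward_ids = {17, 18, 19, 20, 21, 22, 23, 24, 25}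
--
--     scores = {
--         "keeper": sum(count for pos, count in positions.items() if pos in keeper_ids),
--         "defender": sum(count for pos, count in positions.items() if pos in defender_ids),
--         "midfielder": sum(count for pos, count in positions.items() if pos in midfielder_ids),
--         "forward": sum(count for pos, count in positions.items() if pos in forward_ids),
--     }
--
--     # If the player has no events in any position, return "dnp" (did not play)
--     if sum(scores.values()) == 0:
--         return "dnp"
--
--     # Get the label with the highest score
--     return max(scores, key=scores.get)
-- ===== SOURCE B (Python) =====
-- _CATEGORY = {1: "keeper"}
-- for _i in range(2, 9):
--     _CATEGORY[_i] = "defender"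
-- for _i in range(9, 17):
--     _CATEGORY[_i] = "midfielder"
-- for _i in range(17, 26):
--     _CATEGORY[_i] = "forward"
--
--
-- def get_position_label(positions):
--     scores = {"keeper": 0, "defender": 0, "midfielder": 0, "forward": 0}
--     for pos, count in positions.items():
--         cat = _CATEGORY.get(pos)
--         if cat is not None:
--             scores[cat] += count
--     if sum(scores.values()) == 0:
--         return "dnp"
--     return max(scores, key=scores.get)
-- ===== Notes on version B (the rewrite author's own statement) =====
-- stated objective: simpler
-- what changed: Replaces A's four separate filtered-sum passes over the items (one per category set) by a single flat id-to-category dict and one accumulating pass over positions.items(), keeping the same dnp test and first-maximum tie-breaking.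
import Mathlib
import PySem

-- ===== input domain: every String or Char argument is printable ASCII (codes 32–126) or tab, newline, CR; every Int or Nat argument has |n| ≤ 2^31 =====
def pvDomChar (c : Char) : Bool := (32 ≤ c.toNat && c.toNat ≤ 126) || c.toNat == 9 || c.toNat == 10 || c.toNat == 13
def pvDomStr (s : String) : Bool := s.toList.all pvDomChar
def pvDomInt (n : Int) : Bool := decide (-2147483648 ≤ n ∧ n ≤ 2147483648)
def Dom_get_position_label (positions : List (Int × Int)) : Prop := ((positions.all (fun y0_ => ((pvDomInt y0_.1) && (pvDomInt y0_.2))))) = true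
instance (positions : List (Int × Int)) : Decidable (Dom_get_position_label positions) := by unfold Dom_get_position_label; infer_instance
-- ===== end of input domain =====

-- B replaces A's four filtered-sum passes over the items by one flat position→category dict and a
-- single accumulating pass (objective: simpler single-pass structure; same observable result).

-- ===== PORT A =====
-- literal port of A: four category id sets, one filtered sum per category, then the shared tail
def get_position_label (positions : List (Int × Int)) : String :=
  let keeper_ids : PySem.Set Int := PySem.Set.ofList [1]
  let defender_ids : PySem.Set Int := PySem.Set.ofList [2, 3, 4, 5, 6, 7, 8]
  let midfielder_ids : PySem.Set Int := PySem.Set.ofList [9, 10, 11, 12, 13, 14, 15, 16]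
  let forward_ids : PySem.Set Int := PySem.Set.ofList [17, 18, 19, 20, 21, 22, 23, 24, 25]
  let scores : PySem.Dict String Int :=
    ((((PySem.Dict.empty.insert "keeper"
        (((positions.filter (fun pc => PySem.Set.contains keeper_ids pc.1)).map (·.2)).sum)).insert
      "defender"
        (((positions.filter (fun pc => PySem.Set.contains defender_ids pc.1)).map (·.2)).sum)).insert
      "midfielder"
        (((positions.filter (fun pc => PySem.Set.contains midfielder_ids pc.1)).map (·.2)).sum)).insert
      "forward"
        (((positions.filter (fun pc => PySem.Set.contains forward_ids pc.1)).map (·.2)).sum))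
  if scores.values.sum == 0 then "dnp"
  else -- max(scores, key=scores.get): every key of scores is present, so scores.get k = scores.getD k 0
    (PySem.List.max? scores.keys (fun k => scores.getD k 0)).getD ""

-- ===== PORT B =====
-- Source B's module-level _CATEGORY dict: {1:'keeper'}, then ranges 2..8, 9..16, 17..25 assigned in loops
def pvCategory : PySem.Dict Int String :=
  (PySem.List.pyRange 17 26 1).foldl (fun d i => d.insert i "forward")
    ((PySem.List.pyRange 9 17 1).foldl (fun d i => d.insert i "midfielder")
      ((PySem.List.pyRange 2 9 1).foldl (fun d i => d.insert i "defender")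
        (PySem.Dict.ofList [((1 : Int), "keeper")])))

def get_position_label_alt (positions : List (Int × Int)) : String :=
  let scores0 : PySem.Dict String Int :=
    (((PySem.Dict.empty.insert "keeper" 0).insert "defender" 0).insert "midfielder" 0).insert
      "forward" 0
  let scores := positions.foldl
    (fun sc pc =>
      match pvCategory.get? pc.1 with
      | none => sc
      | some cat => sc.insert cat (sc.getD cat 0 + pc.2)) scores0
  if scores.values.sum == 0 then "dnp"
  else -- max(scores, key=scores.get): every key of scores is present, so scores.get k = scores.getD k 0
    (PySem.List.max? scores.keys (fun k => scores.getD k 0)).getD ""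

-- ===== PRECONDITION & SPEC =====
def Spec_get_position_label (positions : List (Int × Int)) (out : String) : Prop := out = get_position_label_alt positions
instance (positions : List (Int × Int)) (out : String) : Decidable (Spec_get_position_label positions out) := by unfold Spec_get_position_label; infer_instance

-- ===== CLAIM (what is proved, stated in full; the proofs are below) =====
def Claim_equal_get_position_label : Prop := ∀ (positions : List (Int × Int)), Dom_get_position_label positions → Spec_get_position_label positions (get_position_label positions)

-- ===== LEMMAS AND PROOFS =====

-- a four-key score dict with given values, in A's/B's shared key order
def pvMk4 (a b c d : Int) : PySem.Dict String Int :=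
  PySem.Dict.mk [("keeper", a), ("defender", b), ("midfielder", c), ("forward", d)]

-- the per-category sums A computes
def pvSum (ids : List Int) (ps : List (Int × Int)) : Int :=
  ((ps.filter (fun pc => PySem.Set.contains (PySem.Set.ofList ids) pc.1)).map (·.2)).sum

-- the flat category dict, characterised by interval tests
set_option maxHeartbeats 2000000 in
theorem pvCategory_get (p : Int) :
    pvCategory.get? p =
      if p = 1 then some "keeper"
      else if 2 ≤ p ∧ p ≤ 8 then some "defender"
      else if 9 ≤ p ∧ p ≤ 16 then some "midfielder"
      else if 17 ≤ p ∧ p ≤ 25 then some "forward"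
      else none := by
  have h : pvCategory = PySem.Dict.mk
      [(1, "keeper"), (2, "defender"), (3, "defender"), (4, "defender"), (5, "defender"),
       (6, "defender"), (7, "defender"), (8, "defender"), (9, "midfielder"), (10, "midfielder"),
       (11, "midfielder"), (12, "midfielder"), (13, "midfielder"), (14, "midfielder"),
       (15, "midfielder"), (16, "midfielder"), (17, "forward"), (18, "forward"), (19, "forward"),
       (20, "forward"), (21, "forward"), (22, "forward"), (23, "forward"), (24, "forward"),
       (25, "forward")] := by decide
  rw [h]
  by_cases hin : 1 ≤ p ∧ p ≤ 25
  · obtain ⟨hl, hr⟩ := hin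
    interval_cases p <;> decide
  · rw [if_neg (by omega), if_neg (by omega), if_neg (by omega), if_neg (by omega)]
    simp only [PySem.Dict.get?_mk_cons, beq_iff_eq]
    repeat rw [if_neg (by omega)]
    rfl

theorem pvSum_cons (ids : List Int) (p c : Int) (ps : List (Int × Int)) :
    pvSum ids ((p, c) :: ps) = (if p ∈ ids then c else 0) + pvSum ids ps := by
  simp only [pvSum, List.filter_cons]
  by_cases h : p ∈ ids
  · rw [if_pos h,
      if_pos (Iff.mpr (PySem.Set.contains_iff _ _) (by simpa [PySem.Set.mem_ofList] using h))]
    simp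
  · rw [if_neg h, if_neg (by
      intro hc
      exact h (by simpa [PySem.Set.mem_ofList] using Iff.mp (PySem.Set.contains_iff _ _) hc))]
    simp

-- one step of B's accumulating loop on the four-key dict
theorem pvStep (p cnt a b c d : Int) :
    (match pvCategory.get? p with
     | none => pvMk4 a b c d
     | some cat => (pvMk4 a b c d).insert cat ((pvMk4 a b c d).getD cat 0 + cnt))
    = pvMk4 (a + if p = 1 then cnt else 0) (b + if 2 ≤ p ∧ p ≤ 8 then cnt else 0)
        (c + if 9 ≤ p ∧ p ≤ 16 then cnt else 0) (d + if 17 ≤ p ∧ p ≤ 25 then cnt else 0) := by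
  rw [pvCategory_get p]
  split_ifs <;>
    simp [pvMk4, PySem.Dict.insert, PySem.Dict.getD, PySem.Dict.get?, PySem.Dict.contains] <;>
    omega

-- B's whole loop computes exactly A's four filtered sums
theorem pvFold (ps : List (Int × Int)) : ∀ a b c d : Int,
    ps.foldl
      (fun sc pc =>
        match pvCategory.get? pc.1 with
        | none => sc
        | some cat => sc.insert cat (sc.getD cat 0 + pc.2)) (pvMk4 a b c d)
    = pvMk4 (a + pvSum [1] ps) (b + pvSum [2, 3, 4, 5, 6, 7, 8] ps)
        (c + pvSum [9, 10, 11, 12, 13, 14, 15, 16] ps)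
        (d + pvSum [17, 18, 19, 20, 21, 22, 23, 24, 25] ps) := by
  induction ps with
  | nil => intro a b c d; simp [pvSum]
  | cons hd tl ih =>
    intro a b c d
    obtain ⟨p, cnt⟩ := hd
    rw [List.foldl_cons]
    rw [pvStep p cnt a b c d, ih]
    rw [pvSum_cons, pvSum_cons, pvSum_cons, pvSum_cons]
    have m1 : (p ∈ [(1:Int)]) ↔ p = 1 := by simp
    have m2 : (p ∈ [(2:Int),3,4,5,6,7,8]) ↔ (2 ≤ p ∧ p ≤ 8) := by simp; omega
    have m3 : (p ∈ [(9:Int),10,11,12,13,14,15,16]) ↔ (9 ≤ p ∧ p ≤ 16) := by simp; omega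
    have m4 : (p ∈ [(17:Int),18,19,20,21,22,23,24,25]) ↔ (17 ≤ p ∧ p ≤ 25) := by simp; omega
    simp only [m1, m2, m3, m4, pvMk4]
    split_ifs <;> congr 1 <;> ring_nf

-- the tail both programs share, on an explicit score dict (proof-side helper)
def pvTailX (scores : PySem.Dict String Int) : String :=
  if scores.values.sum == 0 then "dnp"
  else (PySem.List.max? scores.keys (fun k => scores.getD k 0)).getD ""

-- ===== VERDICT (by name: the statement is the Claim_ definition above) =====
theorem get_position_label_spec : Claim_equal_get_position_label := by
  intro ps _
  show get_position_label ps = get_position_label_alt ps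
  have h1 : get_position_label ps
      = pvTailX (pvMk4 (pvSum [1] ps) (pvSum [2, 3, 4, 5, 6, 7, 8] ps)
          (pvSum [9, 10, 11, 12, 13, 14, 15, 16] ps)
          (pvSum [17, 18, 19, 20, 21, 22, 23, 24, 25] ps)) := rfl
  have h2 : get_position_label_alt ps
      = pvTailX (ps.foldl
          (fun sc pc =>
            match pvCategory.get? pc.1 with
            | none => sc
            | some cat => sc.insert cat (sc.getD cat 0 + pc.2)) (pvMk4 0 0 0 0)) := rfl
  rw [h1, h2, pvFold]
  simp only [zero_add]
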